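-- pv_equiv track=rewrite | github.com/lberardinelli/slps | topics/recovery/hunter/hunter.py | assembleBracketedSymbols
-- ===== SOURCE A (Python) =====
-- def assembleBracketedSymbols(ts,start,end,preserveSpace):
-- 	tss = []
-- 	inside = False
-- 	i = 0
-- 	while (i<len(ts)):
-- 		if inside:
-- 			if preserveSpace and ts[i] != end and tss[-1][-1] != start:
-- 				tss[-1] += ' '
-- 			tss[-1] += ts[i]
-- 			if ts[i] == end:
-- 				inside = False
-- 		else:
-- 			tss.append(ts[i])
-- 			if ts[i] == start:
-- 				inside = True
-- 		i += 1
-- 	return tss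
-- ===== SOURCE B (Python) =====
-- def assembleBracketedSymbols(ts, start, end, preserveSpace):
--     # different decomposition: an outer scan over the tokens plus a separate
--     # group-collector, instead of A's single-loop `inside`-flag state machine
--     # that mutates the last element of the result list in place
--     out = []
--     i = 0
--     n = len(ts)
--     while i < n:
--         t = ts[i]
--         if t != start:
--             out.append(t)
--             i += 1
--         else:
--             group, i = _collectGroup(t, ts, i + 1, start, end, preserveSpace)
--             out.append(group)
--     return out
--
--
-- def _collectGroup(group, ts, i, start, end, preserveSpace):
--     # consume tokens into `group` until one equal to `end` has been appended
--     # (or the tokens run out); return the finished group and the next index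
--     while i < len(ts):
--         u = ts[i]
--         i += 1
--         if preserveSpace and u != end and group[-1] != start:
--             group = group + ' '
--         group = group + u
--         if u == end:
--             return group, i
--     return group, i
-- ===== Notes on version B (the rewrite author's own statement) =====
-- stated objective: alternative
-- what changed: Replaces A's single while-loop state machine (an 'inside' flag plus in-place mutation of the list's last element) with a recursive decomposition: a top-level recursion over the tokens and a separate recursive group-collector that consumes a bracketed group and returns the finished group together with the remaining tokens.
-- outside the precondition, e.g. on assembleBracketedSymbols(['', 'x'], '', ')', True): A raises IndexError, B raises IndexError; on assembleBracketedSymbols([''], '', 'x', True): A returns [''], B returns ['']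
import Mathlib
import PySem

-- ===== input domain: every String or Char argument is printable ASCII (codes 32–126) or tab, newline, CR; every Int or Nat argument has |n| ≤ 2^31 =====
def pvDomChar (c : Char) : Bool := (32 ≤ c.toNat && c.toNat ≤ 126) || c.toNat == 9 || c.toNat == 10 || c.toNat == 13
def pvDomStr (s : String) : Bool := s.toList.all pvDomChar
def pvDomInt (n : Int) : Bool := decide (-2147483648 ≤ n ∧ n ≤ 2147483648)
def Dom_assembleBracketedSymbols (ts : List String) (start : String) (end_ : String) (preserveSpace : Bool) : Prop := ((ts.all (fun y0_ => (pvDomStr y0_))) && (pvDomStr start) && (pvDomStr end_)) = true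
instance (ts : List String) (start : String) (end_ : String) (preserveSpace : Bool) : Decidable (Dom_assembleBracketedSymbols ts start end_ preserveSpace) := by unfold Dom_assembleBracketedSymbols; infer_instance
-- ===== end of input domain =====

-- B replaces A's single-pass `inside`-flag state machine (mutating the last list cell)
-- by a recursive decomposition: top-level recursion over the tokens plus a separate
-- recursive group-collector; objective: simpler structure, same O(n) cost (return value only).

-- shared primitive of both Pythons: `group[-1] != start` (a one-char string compared to
-- `start`); on the empty string Python raises IndexError — that input is outside Pre_,
-- here it returns true uniformly.
def pyLastCharNe (g start : String) : Bool :=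
  match g.toList.getLast? with
  | some c => String.mk [c] != start
  | none => true

-- ===== PORT A =====
-- the while-loop of A: state = (accumulated list tss, inside flag); tss[-1] += x is
-- modelled by dropLast ++ [updated last]
def aLoopABS (start end_ : String) (ps : Bool) : List String → List String → Bool → List String
  | [], tss, _ => tss
  | t :: rest, tss, inside =>
    if inside then
      let g := tss.getLast?.getD ""
      let g := if ps && (t != end_) && pyLastCharNe g start then g ++ " " else g
      let g := g ++ t
      aLoopABS start end_ ps rest (tss.dropLast ++ [g]) (if t == end_ then false else inside)
    else
      aLoopABS start end_ ps rest (tss ++ [t]) (if t == start then true else inside)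

def assembleBracketedSymbols (ts : List String) (start : String) (end_ : String) (preserveSpace : Bool) : List String :=
  aLoopABS start end_ preserveSpace ts [] false

-- ===== PORT B =====
-- _collectGroup of Source B
def collectGroupABS (start end_ : String) (ps : Bool) : String → List String → String × List String
  | g, [] => (g, [])
  | g, u :: rest =>
    let g' := (if ps && (u != end_) && pyLastCharNe g start then g ++ " " else g) ++ u
    if u == end_ then (g', rest) else collectGroupABS start end_ ps g' rest

theorem collectGroupABS_len (start end_ : String) (ps : Bool) :
    ∀ (g : String) (rest : List String), (collectGroupABS start end_ ps g rest).2.length ≤ rest.length := by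
  intro g rest
  induction rest generalizing g with
  | nil => simp [collectGroupABS]
  | cons u rest ih =>
    simp only [collectGroupABS]
    split
    · simp
    · exact Nat.le_succ_of_le (ih _)

-- top-level recursion of Source B
def bGoABS (start end_ : String) (ps : Bool) : List String → List String
  | [] => []
  | t :: rest =>
    if t != start then t :: bGoABS start end_ ps rest
    else
      let p := collectGroupABS start end_ ps t rest
      p.1 :: bGoABS start end_ ps p.2
termination_by ts => ts.length
decreasing_by
  · simp
  · exact Nat.lt_succ_of_le (collectGroupABS_len start end_ ps t rest)

def assembleBracketedSymbols_alt (ts : List String) (start : String) (end_ : String) (preserveSpace : Bool) : List String :=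
  bGoABS start end_ preserveSpace ts

-- ===== PRECONDITION & SPEC =====
-- Pre_ excludes preserveSpace=True with start='' and an empty-string token in ts: there a
-- ''-token can open an empty group and the next token makes `group[-1]` raise IndexError
-- in A (and likewise in B); on the remaining such inputs both return the same value anyway.
def Pre_assembleBracketedSymbols (ts : List String) (start : String) (end_ : String) (preserveSpace : Bool) : Prop :=
  ¬ (preserveSpace = true ∧ start = "" ∧ "" ∈ ts)
instance (ts : List String) (start : String) (end_ : String) (preserveSpace : Bool) : Decidable (Pre_assembleBracketedSymbols ts start end_ preserveSpace) := by unfold Pre_assembleBracketedSymbols; infer_instance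

def pvWitness_assembleBracketedSymbols : List String × String × String × Bool :=
  (["(", "a", "b", ")", "c"], "(", ")", true)

def Spec_assembleBracketedSymbols (ts : List String) (start : String) (end_ : String) (preserveSpace : Bool) (out : List String) : Prop := out = assembleBracketedSymbols_alt ts start end_ preserveSpace
instance (ts : List String) (start : String) (end_ : String) (preserveSpace : Bool) (out : List String) : Decidable (Spec_assembleBracketedSymbols ts start end_ preserveSpace out) := by unfold Spec_assembleBracketedSymbols; infer_instance

-- ===== CLAIM (what is proved, stated in full; the proofs are below) =====
def Claim_equal_assembleBracketedSymbols : Prop := ∀ (ts : List String) (start : String) (end_ : String) (preserveSpace : Bool), Dom_assembleBracketedSymbols ts start end_ preserveSpace → Pre_assembleBracketedSymbols ts start end_ preserveSpace → Spec_assembleBracketedSymbols ts start end_ preserveSpace (assembleBracketedSymbols ts start end_ preserveSpace)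

-- ===== LEMMAS AND PROOFS =====

-- joint loop invariant: A's loop with inside=false appends B's result to the accumulator,
-- and with inside=true it continues exactly as B's group-collector on the open last cell.
theorem aLoopABS_bGo (start end_ : String) (ps : Bool) :
    ∀ (n : ℕ) (ts : List String), ts.length ≤ n →
      (∀ tss, aLoopABS start end_ ps ts tss false = tss ++ bGoABS start end_ ps ts) ∧
      (∀ front g,
        aLoopABS start end_ ps ts (front ++ [g]) true =
          front ++ (collectGroupABS start end_ ps g ts).1 ::
            bGoABS start end_ ps (collectGroupABS start end_ ps g ts).2) := by
  intro n
  induction n with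
  | zero =>
    intro ts hlen
    have : ts = [] := List.eq_nil_of_length_eq_zero (Nat.le_zero.mp hlen)
    subst this
    simp [aLoopABS, bGoABS, collectGroupABS]
  | succ m ih =>
    intro ts hlen
    match ts with
    | [] => simp [aLoopABS, bGoABS, collectGroupABS]
    | t :: rest =>
      have hrest : rest.length ≤ m := by simpa using Nat.lt_succ_iff.mp (Nat.lt_of_lt_of_le (by simp) hlen)
      constructor
      · intro tss
        by_cases hts : t == start
        · have h2 := (ih rest hrest).2 tss t
          have hb : bGoABS start end_ ps (t :: rest) =
              (collectGroupABS start end_ ps t rest).1 ::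
                bGoABS start end_ ps (collectGroupABS start end_ ps t rest).2 := by
            rw [bGoABS]
            simp [eq_of_beq hts]
          simp only [aLoopABS, hts, Bool.false_eq_true, if_false, if_true]
          rw [h2, hb, List.append_cons]
        · have h1 := (ih rest hrest).1 (tss ++ [t])
          have hb : bGoABS start end_ ps (t :: rest) = t :: bGoABS start end_ ps rest := by
            rw [bGoABS]
            simp_all
          simp only [aLoopABS, hts, Bool.false_eq_true, if_false]
          rw [h1, hb]
          simp
      · intro front g
        simp only [aLoopABS, if_true, List.getLast?_append, List.getLast?_singleton,
          Option.some_or, Option.getD_some, List.dropLast_concat]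
        set g' := (if ps && (t != end_) && pyLastCharNe g start then g ++ " " else g) ++ t with hg'
        by_cases hte : t == end_
        · have h1 := (ih rest hrest).1 (front ++ [g'])
          have hc : collectGroupABS start end_ ps g (t :: rest) = (g', rest) := by
            simp [collectGroupABS, hte, hg']
          simp only [hte, if_true]
          rw [h1, hc, List.append_assoc]
          rfl
        · have h2 := (ih rest hrest).2 front g'
          have hc : collectGroupABS start end_ ps g (t :: rest) = collectGroupABS start end_ ps g' rest := by
            simp [collectGroupABS, hte, hg']
          simp only [hte, Bool.false_eq_true, if_false]
          rw [h2, hc]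

-- ===== VERDICT (by name: the statement is the Claim_ definition above) =====
theorem assembleBracketedSymbols_spec : Claim_equal_assembleBracketedSymbols := by
  intro ts start end_ ps _ _
  unfold Spec_assembleBracketedSymbols assembleBracketedSymbols assembleBracketedSymbols_alt
  simpa using (aLoopABS_bGo start end_ ps ts.length ts (Nat.le_refl _)).1 []
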